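-- pv_equiv track=rewrite | github.com/rainapra/Python-Practice-basic-problems | primenumber_count.py | pr_count
-- ===== SOURCE A (Python) =====
-- def pr_count(start,n):
--     s=[]
--     count=1
--     while count<=n:
--         if(start % 2 ==0):
--             s.append(start)
--             count += 1
--         else:
--             False
--         start += 1
--     return s
-- ===== SOURCE B (Python) =====
-- def pr_count(start, n):
--     first = start if start % 2 == 0 else start + 1
--     return [first + 2 * i for i in range(n)]
-- ===== Notes on version B (the rewrite author's own statement) =====
-- stated objective: faster
-- what changed: Replaces the scan-and-test loop over every integer with a closed-form arithmetic stride: compute the first even number and emit first+2*i for i in range(n).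
import Mathlib
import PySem

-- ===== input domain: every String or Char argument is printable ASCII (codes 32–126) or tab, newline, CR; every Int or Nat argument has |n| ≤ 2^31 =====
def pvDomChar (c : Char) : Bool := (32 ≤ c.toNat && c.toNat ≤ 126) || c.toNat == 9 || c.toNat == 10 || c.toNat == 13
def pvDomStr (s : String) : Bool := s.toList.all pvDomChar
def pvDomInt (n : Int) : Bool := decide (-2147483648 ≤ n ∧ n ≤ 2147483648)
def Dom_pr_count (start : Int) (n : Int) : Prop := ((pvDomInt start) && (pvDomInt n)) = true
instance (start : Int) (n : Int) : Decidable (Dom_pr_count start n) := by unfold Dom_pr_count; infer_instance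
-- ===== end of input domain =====

-- B replaces A's scan-and-test while loop with direct arithmetic generation of the evens.

-- ===== PORT A =====
-- the while loop of A: state (s accumulated implicitly via cons, count, start); terminates
-- because every second step finds an even number and increments count towards n
def pr_count_loop (start : Int) (count : Int) (n : Int) : List Int :=
  if _h : count ≤ n then
    if start % 2 == 0 then
      start :: pr_count_loop (start + 1) (count + 1) n
    else
      pr_count_loop (start + 1) count n
  else []
termination_by (2 * (n - count + 1) - (if start % 2 == 0 then 1 else 0)).toNat
decreasing_by
  all_goals (simp only [beq_iff_eq] at *; split_ifs <;> omega)

def pr_count (start : Int) (n : Int) : List Int :=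
  pr_count_loop start 1 n

-- ===== PORT B =====
def pr_count_alt (start : Int) (n : Int) : List Int :=
  let first := if start % 2 == 0 then start else start + 1
  (PySem.List.pyRange 0 n 1).map (fun i => first + 2 * i)

-- ===== PRECONDITION & SPEC =====
def Spec_pr_count (start : Int) (n : Int) (out : List Int) : Prop := out = pr_count_alt start n
instance (start : Int) (n : Int) (out : List Int) : Decidable (Spec_pr_count start n out) := by unfold Spec_pr_count; infer_instance

-- ===== CLAIM (what is proved, stated in full; the proofs are below) =====
def Claim_equal_pr_count : Prop := ∀ (start : Int) (n : Int), Dom_pr_count start n → Spec_pr_count start n (pr_count start n)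

-- ===== LEMMAS AND PROOFS =====

/-- proof helper: the list [first, first+2, …] of length k -/
def evensFrom (first : Int) : Nat → List Int
  | 0 => []
  | k + 1 => first :: evensFrom (first + 2) k

lemma loop_eq_evensFrom (n start count : Int) :
    pr_count_loop start count n =
      evensFrom (if start % 2 == 0 then start else start + 1) (n - count + 1).toNat := by
  induction start, count using pr_count_loop.induct n with
  | case1 start count h hev ih =>
    have h1 : (n - count + 1).toNat = (n - (count + 1) + 1).toNat + 1 := by omega
    have h2 : ¬ ((start + 1) % 2 == 0) = true := by
      simp only [beq_iff_eq] at hev ⊢; omega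
    rw [pr_count_loop, dif_pos h, if_pos hev, ih, if_neg h2, if_pos hev, h1, evensFrom]
    have e : start + 1 + 1 = start + 2 := by ring
    rw [e]
  | case2 start count h hev ih =>
    have h2 : ((start + 1) % 2 == 0) = true := by
      simp only [beq_iff_eq] at hev ⊢; omega
    rw [pr_count_loop, dif_pos h, if_neg hev, ih, if_pos h2, if_neg hev]
  | case3 start count h =>
    rw [pr_count_loop, dif_neg h, show (n - count + 1).toNat = 0 from by omega, evensFrom]

lemma range_map_eq_evensFrom (k : Nat) (first : Int) :
    (List.range k).map (fun j : Nat => first + 2 * (j : Int)) = evensFrom first k := by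
  induction k generalizing first with
  | zero => simp [evensFrom]
  | succ m ih =>
    rw [List.range_succ_eq_map, evensFrom]
    simp only [List.map_cons, List.map_map]
    congr 1
    · simp
    · rw [← ih (first + 2)]
      apply List.map_congr_left
      intro j _
      simp only [Function.comp_apply, Nat.succ_eq_add_one]
      push_cast
      ring

lemma alt_eq_evensFrom (start n : Int) :
    pr_count_alt start n =
      evensFrom (if start % 2 == 0 then start else start + 1) n.toNat := by
  unfold pr_count_alt
  rw [PySem.List.pyRange_one]
  simp only [Int.sub_zero, List.map_map]
  generalize (if (start % 2 == 0) = true then start else start + 1) = F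
  have e : List.map ((fun i => F + 2 * i) ∘ fun k : Nat => (0 : Int) + (k : Int))
      (List.range n.toNat) = List.map (fun j : Nat => F + 2 * (j : Int)) (List.range n.toNat) := by
    apply List.map_congr_left
    intro j _
    simp only [Function.comp_apply, zero_add]
  rw [e, range_map_eq_evensFrom]

-- ===== VERDICT (by name: the statement is the Claim_ definition above) =====
theorem pr_count_spec : Claim_equal_pr_count := by
  intro start n _
  unfold Spec_pr_count pr_count
  rw [loop_eq_evensFrom n, alt_eq_evensFrom]
  congr 1
  omega
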